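-- pv_equiv track=rewrite | github.com/Bisue/problem-solving | programmers/17687.py | solution
-- ===== SOURCE A (Python) =====
-- from collections import deque
--
-- def convert(num, n):
--     strs = deque()
--     if num == 0:
--         strs.append("0")
--
--     while num > 0:
--         digit = num % n
--         if digit < 10:
--             digit = str(digit)
--         else:
--             digit = chr(ord("A") + (digit - 10))
--
--         strs.appendleft(digit)
--         num //= n
--
--     return "".join(strs)
--
-- def solution(n, t, m, p):
--     mines = []
--     buffer = deque()
--
--     turn = 0
--     num = 0
--     while len(mines) < t:
--         if len(buffer) == 0:
--             digits = list(convert(num, n))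
--
--             for digit in digits:
--                 buffer.append(digit)
--
--             num += 1
--
--         now = buffer.popleft()
--
--         if turn % m == p - 1:
--             mines.append(now)
--
--         turn += 1
--
--     return "".join(mines)
-- ===== SOURCE B (Python) =====
-- def _total(x, n):
--     # number of characters in the concatenation of the base-n forms of 0, 1, ..., x-1
--     if x <= 0:
--         return 0
--     s = 1  # the single character of "0"
--     d = 1
--     start = 1
--     while start < x:
--         s += d * (min(x, start * n) - start)
--         start *= n
--         d += 1
--     return s
--
--
-- def solution(n, t, m, p):
--     out = []
--     for k in range(t):
--         i = p - 1 + k * m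
--         # exponential + binary search for the largest num with _total(num) <= i
--         hi = 1
--         while _total(hi, n) <= i:
--             hi *= 2
--         lo = 0
--         while hi - lo > 1:
--             mid = (lo + hi) // 2
--             if _total(mid, n) <= i:
--                 lo = mid
--             else:
--                 hi = mid
--         num = lo
--         j = i - _total(num, n)
--         # L = number of base-n digits of num
--         L = 1
--         start = 1
--         while start * n <= num:
--             start *= n
--             L += 1
--         dgt = (num // n ** (L - 1 - j)) % n
--         out.append(str(dgt) if dgt < 10 else chr(ord("A") + dgt - 10))
--     return "".join(out)
-- ===== Notes on version B (the rewrite author's own statement) =====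
-- stated objective: faster
-- what changed: A simulates the character stream turn by turn through a deque; B computes, for each of the t target indices, the number containing it by binary search over a closed-form cumulative digit-count and extracts the digit arithmetically.
-- outside the precondition, e.g. on solution(2, 3, -2, 1): A returns '011', B returns '000'; on solution(0, 1, 5, 1): A returns '0', B does not finish within the time limit; on solution(-2, 2, 1, 1): A returns '0-', B returns '0-1'
import Mathlib
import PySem

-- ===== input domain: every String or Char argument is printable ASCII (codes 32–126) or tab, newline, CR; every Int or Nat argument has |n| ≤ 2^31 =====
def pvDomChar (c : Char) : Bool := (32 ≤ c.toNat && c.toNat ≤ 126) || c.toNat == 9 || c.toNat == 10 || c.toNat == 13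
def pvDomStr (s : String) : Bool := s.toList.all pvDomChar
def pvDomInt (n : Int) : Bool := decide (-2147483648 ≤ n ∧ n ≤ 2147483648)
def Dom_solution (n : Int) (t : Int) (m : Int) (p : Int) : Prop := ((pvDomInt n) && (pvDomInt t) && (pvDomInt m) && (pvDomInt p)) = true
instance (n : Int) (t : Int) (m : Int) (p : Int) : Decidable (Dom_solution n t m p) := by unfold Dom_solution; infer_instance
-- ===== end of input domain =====

-- B replaces A's char-by-char stream simulation by, per target index, a binary
-- search over a closed-form cumulative digit-count (objective: faster).

-- ===== PORT A =====
-- convert's inner while: deque.appendleft becomes cons onto the accumulator.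
-- '0 < num ∧ 2 ≤ n' as dite condition: the extra '2 ≤ n' only makes the loop total
-- (Python diverges/raises for n ≤ 1, outside Pre_).  str(digit) for 0 ≤ digit < 10 is
-- one char; chr(65 + digit - 10) is exact within Pre_'s character bound.
def pvConvertLoop (n : Int) (num : Int) (acc : List Char) : List Char :=
  if h : 0 < num ∧ 2 ≤ n then
    let digit := PySem.Int.mod num n
    pvConvertLoop n (PySem.Int.floordiv num n)
      ((if digit < 10 then Char.ofNat (48 + digit.toNat)
        else Char.ofNat (65 + (digit - 10).toNat)) :: acc)
  else acc
termination_by num.toNat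
decreasing_by
  rw [PySem.Int.floordiv_eq_ediv_of_pos (by omega)]
  exact (Int.toNat_lt_toNat h.1).2
    (Int.ediv_lt_of_lt_mul (by omega) ((lt_mul_iff_one_lt_right h.1).2 (by omega)))

def pvConvert (num : Int) (n : Int) : List Char :=
  pvConvertLoop n num (if num = 0 then ['0'] else [])

-- the outer while: fuel = p + (t-1)*m is exactly the number of iterations Python
-- performs inside Pre_ (the loop stops after the (p + (t-1)*m)-th character is taken).
def pvSolLoop (n t m p : Int) (fuel : Nat) (mines buffer : List Char) (turn num : Int) : List Char :=
  match fuel with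
  | 0 => mines
  | Nat.succ fuel =>
    if (mines.length : Int) < t then
      let st := if buffer.isEmpty then (buffer ++ pvConvert num n, num + 1) else (buffer, num)
      match st.1 with
      | [] => mines   -- never reached inside Pre_ (convert is nonempty); totality fallback
      | now :: rest =>
        pvSolLoop n t m p fuel
          (if PySem.Int.mod turn m = p - 1 then mines ++ [now] else mines)
          rest (turn + 1) st.2
    else mines

def solution (n : Int) (t : Int) (m : Int) (p : Int) : String :=
  String.mk (pvSolLoop n t m p (p + (t - 1) * m).toNat [] [] 0 0)

-- ===== PORT B =====
-- _total's while loop; '2 ≤ n ∧ 1 ≤ start' added to the dite makes it total (outside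
-- Pre_ Python's loop may diverge).
def pvTotalLoop (n x s d start : Int) : Int :=
  if h : 2 ≤ n ∧ 1 ≤ start ∧ start < x then
    pvTotalLoop n x (s + d * (min x (start * n) - start)) (d + 1) (start * n)
  else s
termination_by (x - start).toNat
decreasing_by
  have h2 : start * 2 ≤ start * n := mul_le_mul_of_nonneg_left h.1 (by omega)
  exact (Int.toNat_lt_toNat (by linarith)).2 (by linarith)

def pvTotal (x n : Int) : Int := if x ≤ 0 then 0 else pvTotalLoop n x 1 1 1

-- the 'while _total(hi, n) <= i: hi *= 2' loop.  '2 ≤ n ∧ 1 ≤ hi ∧ hi ≤ i' only makes the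
-- loop total: inside Pre_ they follow from the Python condition (hi ≤ _total(hi) ≤ i).
def pvExpSearch (n i hi : Int) : Int :=
  if h : 2 ≤ n ∧ 1 ≤ hi ∧ hi ≤ i ∧ pvTotal hi n ≤ i then pvExpSearch n i (hi * 2) else hi
termination_by (i + 1 - hi).toNat
decreasing_by
  exact (Int.toNat_lt_toNat (by omega)).2 (by omega)

-- midpoint bounds, cited by pvBinLoop's decreasing_by
theorem pvMidBounds (lo hi : Int) (h : 1 < hi - lo) :
    lo + 1 ≤ PySem.Int.floordiv (lo + hi) 2 ∧ PySem.Int.floordiv (lo + hi) 2 < hi :=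
  ⟨(PySem.Int.le_floordiv_iff_mul_le (by omega)).2 (by omega),
   (PySem.Int.floordiv_lt_iff_lt_mul (by omega)).2 (by omega)⟩

-- the 'while hi - lo > 1' bisection loop
def pvBinLoop (n i lo hi : Int) : Int :=
  if h : 1 < hi - lo then
    let mid := PySem.Int.floordiv (lo + hi) 2
    if pvTotal mid n ≤ i then pvBinLoop n i mid hi else pvBinLoop n i lo mid
  else lo
termination_by (hi - lo).toNat
decreasing_by
  · exact (Int.toNat_lt_toNat (by omega)).2 (by
      have h2 := (pvMidBounds lo hi h).1
      omega)
  · exact (Int.toNat_lt_toNat (by omega)).2 (by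
      have h2 := (pvMidBounds lo hi h).2
      omega)

-- the 'while start * n <= num' length loop ('2 ≤ n ∧ 1 ≤ start' for totality)
def pvLenLoop (n num L start : Int) : Int :=
  if h : 2 ≤ n ∧ 1 ≤ start ∧ start * n ≤ num then pvLenLoop n num (L + 1) (start * n) else L
termination_by (num - start).toNat
decreasing_by
  have h2 : start * 2 ≤ start * n := mul_le_mul_of_nonneg_left h.1 (by omega)
  exact (Int.toNat_lt_toNat (by linarith)).2 (by linarith)

-- n ** (L - 1 - j): the exponent is ≥ 0 whenever Python reaches it inside Pre_,
-- so Int exponentiation with '.toNat' is exact there.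
def solution_alt (n : Int) (t : Int) (m : Int) (p : Int) : String :=
  String.mk ((PySem.List.pyRange 0 t 1).map (fun k =>
    let i := p - 1 + k * m
    let hi := pvExpSearch n i 1
    let num := pvBinLoop n i 0 hi
    let j := i - pvTotal num n
    let L := pvLenLoop n num 1 1
    let dgt := PySem.Int.mod (PySem.Int.floordiv num (n ^ (L - 1 - j).toNat)) n
    if dgt < 10 then Char.ofNat (48 + dgt.toNat) else Char.ofNat (65 + (dgt - 10).toNat)))

-- ===== PRECONDITION & SPEC =====
-- Pre_ restricts to the problem's natural domain (2 ≤ n, 1 ≤ p ≤ m; outside it A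
-- diverges, raises ZeroDivisionError, or returns accidental values of Python's
-- negative modulo / negative bases), plus t ≤ 0, where A returns "" for any n, m, p;
-- the last conjunct excludes exactly the runs whose digits exceed chr's range
-- (ValueError): with n ≥ 1114058 every consumed number is a single digit, so A raises
-- iff more than 1114057 characters are consumed.
def Pre_solution (n : Int) (t : Int) (m : Int) (p : Int) : Prop :=
  t ≤ 0 ∨ (2 ≤ n ∧ 1 ≤ m ∧ 1 ≤ p ∧ p ≤ m ∧ (n ≤ 1114057 ∨ p + (t - 1) * m ≤ 1114057))
instance (n : Int) (t : Int) (m : Int) (p : Int) : Decidable (Pre_solution n t m p) := by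
  unfold Pre_solution; infer_instance

def pvWitness_solution : Int × Int × Int × Int := (2, 5, 2, 1)

def Spec_solution (n : Int) (t : Int) (m : Int) (p : Int) (out : String) : Prop := out = solution_alt n t m p
instance (n : Int) (t : Int) (m : Int) (p : Int) (out : String) : Decidable (Spec_solution n t m p out) := by unfold Spec_solution; infer_instance

-- ===== CLAIM (what is proved, stated in full; the proofs are below) =====
def Claim_equal_solution : Prop := ∀ (n : Int) (t : Int) (m : Int) (p : Int), Dom_solution n t m p → Pre_solution n t m p → Spec_solution n t m p (solution n t m p)

-- ===== LEMMAS AND PROOFS =====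

-- reference semantics: the character stream, over Nat
def pvCh (d : Nat) : Char := if d < 10 then Char.ofNat (48 + d) else Char.ofNat (55 + d)

def pvRep (N v : Nat) : List Char := if v = 0 then ['0'] else ((Nat.digits N v).map pvCh).reverse

def pvStream (N x : Nat) : List Char := (List.range x).flatMap (pvRep N)

def pvT (N x : Nat) : Nat := (pvStream N x).length

def pvAt (N i : Nat) : Char := (pvStream N (i + 1)).getD i 'X'

theorem pvRep_length_pos (N v : Nat) : 0 < (pvRep N v).length := by
  unfold pvRep
  split
  · simp
  · simp only [List.length_reverse, List.length_map]
    exact List.length_pos_iff.2 (Nat.digits_ne_nil_iff_ne_zero.2 (by assumption))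

theorem pvRep_length (N v : Nat) (hN : 2 ≤ N) (hv : v ≠ 0) :
    (pvRep N v).length = Nat.log N v + 1 := by
  unfold pvRep
  rw [if_neg hv]
  simp [Nat.length_digits N v (by omega) hv]

theorem pvStream_succ (N x : Nat) : pvStream N (x + 1) = pvStream N x ++ pvRep N x := by
  unfold pvStream
  rw [List.range_succ, List.flatMap_append]
  simp

theorem pvT_succ (N x : Nat) : pvT N (x + 1) = pvT N x + (pvRep N x).length := by
  unfold pvT
  rw [pvStream_succ, List.length_append]

theorem pvStream_prefix (N x y : Nat) (h : x ≤ y) : pvStream N x <+: pvStream N y := by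
  induction y with
  | zero => have : x = 0 := by omega
            simp [this]
  | succ y ih =>
    rcases Nat.lt_or_ge x (y+1) with hlt | hge
    · exact (ih (by omega)).trans ⟨pvRep N y, (pvStream_succ N y).symm⟩
    · have : x = y + 1 := by omega
      simp [this]

theorem pvT_ge (N x : Nat) : x ≤ pvT N x := by
  induction x with
  | zero => simp
  | succ k ih =>
    have h1 := pvT_succ N k
    have h2 := pvRep_length_pos N k
    omega

theorem pvAt_eq (N x i : Nat) (h : i < pvT N x) : (pvStream N x).getD i 'X' = pvAt N i := by
  unfold pvAt
  rcases Nat.le_total x (i+1) with hxy | hxy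
  · obtain ⟨u, hu⟩ := pvStream_prefix N x (i+1) hxy
    rw [← hu, List.getD_append _ _ _ _ h]
  · obtain ⟨u, hu⟩ := pvStream_prefix N (i+1) x hxy
    have hi : i < (pvStream N (i+1)).length := by
      have := pvT_ge N (i+1)
      exact Nat.lt_of_lt_of_le (by omega) this
    rw [← hu, List.getD_append _ _ _ _ hi]

-- every one of the x numbers 0..x-1 contributes at least one character
theorem pvTotalLoop_ge_s (n x s d start : Int) (hd : 0 ≤ d) : s ≤ pvTotalLoop n x s d start := by
  revert hd
  induction s, d, start using pvTotalLoop.induct (n := n) (x := x) with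
  | case1 s d start h ih =>
    intro hd
    rw [pvTotalLoop, dif_pos h]
    refine le_trans ?_ (ih (by omega))
    have h1 : start ≤ start * n := le_mul_of_one_le_right (by omega) (by omega)
    have h2 : 0 ≤ min x (start * n) - start := by omega
    nlinarith
  | case2 s d start h =>
    intro _
    rw [pvTotalLoop, dif_neg h]

theorem pvTotalLoop_ge (n x s d start : Int) (hn : 2 ≤ n) (hs : 1 ≤ start) (hd : 1 ≤ d) :
    s + (x - start) ≤ pvTotalLoop n x s d start := by
  revert hn hs hd
  induction s, d, start using pvTotalLoop.induct (n := n) (x := x) with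
  | case1 s d start h ih =>
    intro hn hs hd
    rw [pvTotalLoop, dif_pos h]
    have h1 : start ≤ start * n := le_mul_of_one_le_right (by omega) (by omega)
    by_cases hxs : start * n ≤ x
    · have := ih hn (by omega) (by omega)
      have hmin : min x (start * n) = start * n := by omega
      nlinarith [this]
    · have := pvTotalLoop_ge_s n x (s + d * (min x (start * n) - start)) (d + 1) (start * n) (by omega)
      have hmin : min x (start * n) = x := by omega
      nlinarith [this]
  | case2 s d start h =>
    intro hn hs hd
    rw [pvTotalLoop, dif_neg h]
    have : ¬ start < x := by tauto
    omega

theorem pvTotal_ge (n x : Int) (hn : 2 ≤ n) (hx : 1 ≤ x) : x ≤ pvTotal x n := by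
  unfold pvTotal
  rw [if_neg (by omega)]
  have := pvTotalLoop_ge n x 1 1 1 hn (by omega) (by omega)
  omega

-- characterising A's convert
theorem pvConvertLoop_eq (N : Nat) (hN : 2 ≤ N) (v : Nat) (acc : List Char) :
    pvConvertLoop (N : Int) (v : Int) acc = ((Nat.digits N v).map pvCh).reverse ++ acc := by
  induction v using Nat.strong_induction_on generalizing acc with
  | _ v ih =>
  rw [pvConvertLoop]
  by_cases hv : v = 0
  · subst hv
    rw [dif_neg (by simp)]
    simp
  · have hv' : 0 < v := Nat.pos_of_ne_zero hv
    rw [dif_pos ⟨by exact_mod_cast hv', by exact_mod_cast hN⟩]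
    simp only [PySem.Int.mod_natCast, PySem.Int.floordiv_natCast]
    have hch : (if ((v % N : Nat) : Int) < 10 then Char.ofNat (48 + ((v % N : Nat) : Int).toNat)
        else Char.ofNat (65 + (((v % N : Nat) : Int) - 10).toNat)) = pvCh (v % N) := by
      unfold pvCh
      by_cases h10 : v % N < 10
      · rw [if_pos (by exact_mod_cast h10), if_pos h10]
        congr 1 <;> omega
      · rw [if_neg (by exact_mod_cast h10), if_neg h10]
        congr 1 <;> omega
    rw [hch, ih (v / N) (Nat.div_lt_self hv' (by omega))]
    rw [Nat.digits_def' (b := N) (by omega) hv']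
    simp

theorem pvConvert_eq (N : Nat) (hN : 2 ≤ N) (v : Nat) :
    pvConvert (v : Int) (N : Int) = pvRep N v := by
  unfold pvConvert pvRep
  by_cases hv : v = 0
  · subst hv
    rw [if_pos (by simp), if_pos rfl, pvConvertLoop, dif_neg (by simp)]
  · rw [if_neg (by exact_mod_cast hv), if_neg hv, pvConvertLoop_eq N hN]
    simp

-- digits indexing: the e-th little-endian digit is v / N^e % N
theorem pvDigits_getD (N : Nat) (hN : 2 ≤ N) (v e : Nat) (he : e < (Nat.digits N v).length) :
    (Nat.digits N v).getD e 0 = v / N ^ e % N := by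
  induction e generalizing v with
  | zero =>
    have hv : v ≠ 0 := by
      intro h
      subst h
      simp at he
    rw [Nat.digits_def' (b := N) (by omega) (Nat.pos_of_ne_zero hv)]
    simp
  | succ e ihe =>
    have hv : v ≠ 0 := by
      intro h
      subst h
      simp at he
    rw [Nat.digits_def' (b := N) (by omega) (Nat.pos_of_ne_zero hv)] at he ⊢
    simp only [List.getD_cons_succ]
    rw [ihe (v / N) (by simpa using he)]
    rw [Nat.div_div_eq_div_mul, pow_succ, mul_comm (N ^ e) N]

-- block count: every v in [a, b) contributes exactly d characters
theorem pvT_block (N d a b : Nat) (hab : a ≤ b)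
    (hlen : ∀ v, a ≤ v → v < b → (pvRep N v).length = d) :
    pvT N b = pvT N a + d * (b - a) := by
  induction b with
  | zero =>
    have : a = 0 := by omega
    simp [this]
  | succ b ihb =>
    by_cases hb : a = b + 1
    · simp [hb]
    · have hab' : a ≤ b := by omega
      have h1 := pvT_succ N b
      have h2 := ihb hab' (fun v h3 h4 => hlen v h3 (by omega))
      have h3 := hlen b hab' (by omega)
      have h4 : d * (b + 1 - a) = d * (b - a) + d := by
        have : b + 1 - a = (b - a) + 1 := by omega
        rw [this, Nat.mul_succ]
      omega

theorem pvRep_length_of_bounds (N d v : Nat) (hN : 2 ≤ N) (hd : 1 ≤ d)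
    (h1 : N ^ (d - 1) ≤ v) (h2 : v < N ^ d) : (pvRep N v).length = d := by
  have hv : v ≠ 0 := by
    have := Nat.one_le_two_pow (n := d - 1)
    have hp : 1 ≤ N ^ (d - 1) := Nat.one_le_pow _ _ (by omega)
    omega
  rw [pvRep_length N v hN hv]
  have hlog : Nat.log N v = d - 1 :=
    Nat.log_eq_of_pow_le_of_lt_pow h1 (by
      have : d - 1 + 1 = d := by omega
      rw [this]
      exact h2)
  omega

-- _total computes the stream-prefix length
theorem pvTotalLoop_eq (N : Nat) (hN : 2 ≤ N) (x : Nat) :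
    ∀ (k d start : Nat), x - start ≤ k → 1 ≤ d → start = N ^ (d - 1) →
    pvTotalLoop (N : Int) (x : Int) ((pvT N (min x start) : Nat) : Int) (d : Int) (start : Int)
      = ((pvT N x : Nat) : Int) := by
  intro k
  induction k with
  | zero =>
    intro d start hk hd hstart
    rw [pvTotalLoop, dif_neg]
    · have : min x start = x := by omega
      rw [this]
    · rintro ⟨-, -, hc⟩
      have : start < x := by exact_mod_cast hc
      omega
  | succ k ihk =>
    intro d start hk hd hstart
    have hs1 : 1 ≤ start := by
      rw [hstart]
      exact Nat.one_le_pow _ _ (by omega)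
    by_cases hsx : start < x
    · rw [pvTotalLoop, dif_pos ⟨by exact_mod_cast hN, by exact_mod_cast hs1, by exact_mod_cast hsx⟩]
      have hmin1 : min x start = start := by omega
      have hpow : start * N = N ^ d := by
        rw [hstart, ← pow_succ]
        congr 1
        omega
      have hblock : pvT N (min x (start * N)) = pvT N start + d * (min x (start * N) - start) := by
        apply pvT_block N d start (min x (start * N)) (by
          have : start ≤ start * N := Nat.le_mul_of_pos_right _ (by omega)
          omega)
        intro v hv1 hv2
        apply pvRep_length_of_bounds N d v hN hd (by omega)
        have : v < start * N := by omega
        omega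
      have hsm : start ≤ min x (start * N) := by
        have : start ≤ start * N := Nat.le_mul_of_pos_right _ (by omega)
        omega
      have hcast : ((pvT N (min x start) : Nat) : Int) + (d : Int) * (min (x : Int) ((start : Int) * (N : Int)) - (start : Int))
          = ((pvT N (min x (start * N)) : Nat) : Int) := by
        rw [hmin1, hblock]
        have hsn : ((start : Int)) * (N : Int) = ((start * N : Nat) : Int) := by push_cast; ring
        rw [hsn, ← Nat.cast_min]
        push_cast [Nat.cast_sub hsm]
        ring
      rw [hcast]
      have harg : ((d : Nat) : Int) + 1 = ((d + 1 : Nat) : Int) := by push_cast; ring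
      have harg2 : ((start : Nat) : Int) * (N : Int) = ((start * N : Nat) : Int) := by push_cast; ring
      rw [harg, harg2]
      apply ihk (d + 1) (start * N) _ (by omega) (by
        rw [Nat.add_sub_cancel]
        exact hpow)
      have h2s : start + 1 ≤ start * N := by nlinarith
      omega
    · rw [pvTotalLoop, dif_neg]
      · have : min x start = x := by omega
        rw [this]
      · rintro ⟨-, -, hc⟩
        have : start < x := by exact_mod_cast hc
        omega

theorem pvT_one (N : Nat) : pvT N 1 = 1 := by
  simp [pvT, pvStream, pvRep]

theorem pvTotal_eq (N : Nat) (hN : 2 ≤ N) (x : Int) :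
    pvTotal x (N : Int) = ((pvT N x.toNat : Nat) : Int) := by
  unfold pvTotal
  by_cases hx : x ≤ 0
  · rw [if_pos hx]
    have : x.toNat = 0 := by omega
    rw [this]
    simp [pvT, pvStream]
  · rw [if_neg hx]
    have hx2 : x = ((x.toNat : Nat) : Int) := by omega
    have hs2 : (1 : Int) = ((pvT N (min x.toNat 1) : Nat) : Int) := by
      have hm : min x.toNat 1 = 1 := by omega
      rw [hm, pvT_one]
      norm_num
    have h2 := pvTotalLoop_eq N hN x.toNat x.toNat 1 1 (by omega) (by omega) (by simp)
    push_cast at h2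
    convert h2 using 2 <;> first | omega | exact hs2

theorem pvExpSearch_post (n i hi : Int) (hn : 2 ≤ n) (hhi : 1 ≤ hi) :
    1 ≤ pvExpSearch n i hi ∧ i < pvTotal (pvExpSearch n i hi) n := by
  revert hn hhi
  induction hi using pvExpSearch.induct (n := n) (i := i) with
  | case1 hi h ih =>
    intro hn hhi
    rw [pvExpSearch, dif_pos h]
    exact ih hn (by omega)
  | case2 hi h =>
    intro hn hhi
    rw [pvExpSearch, dif_neg h]
    refine ⟨hhi, ?_⟩
    by_cases hle : hi ≤ i
    · by_contra hc
      exact h ⟨hn, hhi, hle, by omega⟩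
    · have := pvTotal_ge n hi hn hhi
      omega

theorem pvBinLoop_post (n i lo hi : Int) (hlo : 0 ≤ lo) (hlt : lo < hi)
    (h1 : pvTotal lo n ≤ i) (h2 : i < pvTotal hi n) :
    0 ≤ pvBinLoop n i lo hi ∧ pvTotal (pvBinLoop n i lo hi) n ≤ i ∧
      i < pvTotal (pvBinLoop n i lo hi + 1) n := by
  revert hlo hlt h1 h2
  induction lo, hi using pvBinLoop.induct (n := n) (i := i) with
  | case1 lo hi h mid hmid ih =>
    intro hlo hlt h1 h2
    rw [pvBinLoop, dif_pos h, if_pos hmid]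
    have hb1 : lo + 1 ≤ PySem.Int.floordiv (lo + hi) 2 :=
      (PySem.Int.le_floordiv_iff_mul_le (by omega)).2 (by omega)
    have hb2 : PySem.Int.floordiv (lo + hi) 2 < hi :=
      (PySem.Int.floordiv_lt_iff_lt_mul (by omega)).2 (by omega)
    exact ih (by omega) (by omega) hmid h2
  | case2 lo hi h mid hmid ih =>
    intro hlo hlt h1 h2
    rw [pvBinLoop, dif_pos h, if_neg hmid]
    have hb1 : lo + 1 ≤ PySem.Int.floordiv (lo + hi) 2 :=
      (PySem.Int.le_floordiv_iff_mul_le (by omega)).2 (by omega)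
    have hb2 : PySem.Int.floordiv (lo + hi) 2 < hi :=
      (PySem.Int.floordiv_lt_iff_lt_mul (by omega)).2 (by omega)
    exact ih hlo (by omega) h1 (by omega)
  | case3 lo hi h =>
    intro hlo hlt h1 h2
    rw [pvBinLoop, dif_neg h]
    have hhi : hi = lo + 1 := by omega
    subst hhi
    exact ⟨hlo, h1, h2⟩

theorem pvLenLoop_aux (N : Nat) (hN : 2 ≤ N) (v : Nat) :
    ∀ (j e : Nat), N ^ e ≤ v → Nat.log N v ≤ e + j →
    pvLenLoop (N : Int) (v : Int) ((e : Int) + 1) ((N ^ e : Nat) : Int)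
      = ((Nat.log N v + 1 : Nat) : Int) := by
  intro j
  induction j with
  | zero =>
    intro e hpow hlog
    have hv : v < N ^ (e + 1) := by
      calc v < N ^ (Nat.log N v + 1) := Nat.lt_pow_succ_log_self (by omega) v
        _ ≤ N ^ (e + 1) := Nat.pow_le_pow_right (by omega) (by omega)
    rw [pvLenLoop, dif_neg]
    · have : Nat.log N v = e := Nat.log_eq_of_pow_le_of_lt_pow hpow hv
      rw [this]
      push_cast
      ring
    · rintro ⟨-, -, hc⟩
      have : ((N ^ e : Nat) : Int) * (N : Int) = ((N ^ (e + 1) : Nat) : Int) := by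
        push_cast
        ring
      rw [this] at hc
      have : N ^ (e + 1) ≤ v := by exact_mod_cast hc
      omega
  | succ j ih =>
    intro e hpow hlog
    by_cases hle : N ^ (e + 1) ≤ v
    · rw [pvLenLoop, dif_pos ⟨by exact_mod_cast hN,
        by exact_mod_cast Nat.one_le_pow e N (by omega), by
        have h9 : ((N ^ e : Nat) : Int) * (N : Int) = ((N ^ (e + 1) : Nat) : Int) := by
          push_cast
          ring
        rw [h9]
        exact_mod_cast hle⟩]
      have harg1 : ((e : Int) + 1) + 1 = ((e + 1 : Nat) : Int) + 1 := by push_cast; ring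
      have harg2 : ((N ^ e : Nat) : Int) * (N : Int) = ((N ^ (e + 1) : Nat) : Int) := by
        push_cast
        ring
      rw [harg1, harg2]
      exact ih (e + 1) hle (by omega)
    · have hv : v < N ^ (e + 1) := by omega
      rw [pvLenLoop, dif_neg]
      · have : Nat.log N v = e := Nat.log_eq_of_pow_le_of_lt_pow hpow hv
        rw [this]
        push_cast
        ring
      · rintro ⟨-, -, hc⟩
        have : ((N ^ e : Nat) : Int) * (N : Int) = ((N ^ (e + 1) : Nat) : Int) := by
          push_cast
          ring
        rw [this] at hc
        have : N ^ (e + 1) ≤ v := by exact_mod_cast hc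
        omega

theorem pvLenLoop_eq (N : Nat) (hN : 2 ≤ N) (v : Nat) :
    pvLenLoop (N : Int) (v : Int) 1 1 = ((pvRep N v).length : Int) := by
  by_cases hv : v = 0
  · subst hv
    rw [pvLenLoop, dif_neg (by
      rintro ⟨h1, h2, h3⟩
      simp at h3
      omega)]
    simp [pvRep]
  · have h0 := pvLenLoop_aux N hN v (Nat.log N v) 0 (by simpa using Nat.one_le_iff_ne_zero.2 hv) (by omega)
    simp only [pow_zero, Nat.cast_one] at h0
    have : ((0 : Nat) : Int) + 1 = 1 := by norm_num
    rw [this] at h0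
    rw [h0, pvRep_length N v hN hv]

-- the character at stream position i, given the number containing it
theorem pvAt_in_rep (N num i : Nat) (hN : 2 ≤ N) (h1 : pvT N num ≤ i) (h2 : i < pvT N (num + 1)) :
    pvAt N i = (pvRep N num).getD (i - pvT N num) 'X' := by
  rw [← pvAt_eq N (num + 1) i h2, pvStream_succ]
  rw [List.getD_append_right]
  · rfl
  · exact h1

theorem pvCh_cast (d : Nat) :
    (if ((d : Nat) : Int) < 10 then Char.ofNat (48 + ((d : Nat) : Int).toNat)
      else Char.ofNat (65 + (((d : Nat) : Int) - 10).toNat)) = pvCh d := by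
  unfold pvCh
  by_cases h10 : d < 10
  · rw [if_pos (by exact_mod_cast h10), if_pos h10]
    congr 1 <;> omega
  · rw [if_neg (by exact_mod_cast h10), if_neg h10]
    congr 1 <;> omega

theorem pvRep_getD (N v : Nat) (hN : 2 ≤ N) (j : Nat) (hj : j < (pvRep N v).length) :
    (pvRep N v).getD j 'X' = pvCh (v / N ^ ((pvRep N v).length - 1 - j) % N) := by
  by_cases hv : v = 0
  · subst hv
    have hrep : pvRep N 0 = ['0'] := by simp [pvRep]
    rw [hrep] at hj ⊢
    simp at hj
    subst hj
    simp [pvCh]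
  · have hrep : pvRep N v = ((Nat.digits N v).map pvCh).reverse := by
      rw [pvRep, if_neg hv]
    have hlen : (pvRep N v).length = (Nat.digits N v).length := by
      rw [hrep]
      simp
    rw [hlen] at hj ⊢
    rw [hrep, List.getD_eq_getElem _ _ (by simpa using hj)]
    rw [List.getElem_reverse]
    rw [List.getElem_map]
    simp only [List.length_map]
    congr 1
    rw [← pvDigits_getD N hN v ((Nat.digits N v).length - 1 - j) (by omega)]
    rw [List.getD_eq_getElem _ _ (by omega)]

-- B's per-index computation finds exactly the stream character
theorem pvPickB_eq (N : Nat) (hN : 2 ≤ N) (i : Nat) :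
    (let hi := pvExpSearch (N : Int) (i : Int) 1
     let num := pvBinLoop (N : Int) (i : Int) 0 hi
     let j := (i : Int) - pvTotal num (N : Int)
     let L := pvLenLoop (N : Int) num 1 1
     let dgt := PySem.Int.mod (PySem.Int.floordiv num ((N : Int) ^ (L - 1 - j).toNat)) (N : Int)
     if dgt < 10 then Char.ofNat (48 + dgt.toNat) else Char.ofNat (65 + (dgt - 10).toNat))
    = pvAt N i := by
  have hn : (2 : Int) ≤ (N : Int) := by exact_mod_cast hN
  simp only []
  obtain ⟨hh1, hh2⟩ := pvExpSearch_post (N : Int) (i : Int) 1 hn (le_refl 1)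
  have h0 : pvTotal 0 (N : Int) ≤ (i : Int) := by
    simp [pvTotal]
  obtain ⟨hb0, hb1, hb2⟩ := pvBinLoop_post (N : Int) (i : Int) 0 (pvExpSearch (N : Int) (i : Int) 1)
    (le_refl 0) (by omega) h0 hh2
  set q := pvBinLoop (N : Int) (i : Int) 0 (pvExpSearch (N : Int) (i : Int) 1) with hq
  have hqN : q = ((q.toNat : Nat) : Int) := by omega
  set v := q.toNat with hv
  have hT1 : pvT N v ≤ i := by
    rw [pvTotal_eq N hN] at hb1
    exact_mod_cast hb1
  have hT2 : i < pvT N (v + 1) := by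
    rw [pvTotal_eq N hN] at hb2
    have h' : (q + 1).toNat = v + 1 := by omega
    rw [h'] at hb2
    exact_mod_cast hb2
  have hL : pvLenLoop (N : Int) q 1 1 = (((pvRep N v).length : Nat) : Int) := by
    rw [hqN]
    exact pvLenLoop_eq N hN v
  have hTsucc : pvT N (v + 1) = pvT N v + (pvRep N v).length := pvT_succ N v
  have hj : ((i : Int) - pvTotal q (N : Int)) = ((i - pvT N v : Nat) : Int) := by
    rw [pvTotal_eq N hN]
    have : q.toNat = v := rfl
    rw [this]
    omega
  have hjlen : i - pvT N v < (pvRep N v).length := by omega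
  have he : (pvLenLoop (N : Int) q 1 1 - 1 - ((i : Int) - pvTotal q (N : Int))).toNat
      = (pvRep N v).length - 1 - (i - pvT N v) := by
    rw [hL, hj]
    omega
  rw [he, hqN]
  have hpow : ((N : Int)) ^ ((pvRep N v).length - 1 - (i - pvT N v))
      = ((N ^ ((pvRep N v).length - 1 - (i - pvT N v)) : Nat) : Int) := by
    push_cast
    ring
  rw [hpow, PySem.Int.floordiv_natCast, PySem.Int.mod_natCast]
  rw [pvCh_cast]
  rw [pvAt_in_rep N v i hN hT1 hT2]
  rw [pvRep_getD N v hN (i - pvT N v) hjlen]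

-- inside the window (targets c - M, targets c], the only turn hitting residue P is targets c
theorem pvWindow (M P c turn : Nat) (hM : 1 ≤ M) (hP : P < M)
    (h1 : turn ≤ P + c * M) (h2 : P + c * M < turn + M) :
    (turn % M = P ↔ turn = P + c * M) := by
  constructor
  · intro hb
    have hdm := Nat.div_add_mod turn M
    rw [hb] at hdm
    set a := turn / M with ha
    have hac : a = c := by
      rcases Nat.lt_trichotomy a c with h | h | h
      · have hmul : M * (a + 1) ≤ M * c := Nat.mul_le_mul_left M h
        have e1 : M * (a + 1) = M * a + M := by ring
        have e2 : c * M = M * c := by ring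
        linarith
      · exact h
      · have hmul : M * (c + 1) ≤ M * a := Nat.mul_le_mul_left M h
        have e1 : M * (c + 1) = M * c + M := by ring
        have e2 : c * M = M * c := by ring
        linarith
    rw [hac] at hdm
    have : M * c = c * M := by ring
    linarith
  · intro h
    subst h
    rw [Nat.add_mul_mod_self_right]
    exact Nat.mod_eq_of_lt hP

-- one iteration of the loop body, after the buffer has been shown nonempty
theorem hlenS_def (N num : Nat) : (pvStream N num).length = pvT N num := rfl

theorem pvStep (N M P tN : Nat) (hN : 2 ≤ N) (hM : 1 ≤ M) (hP : P < M)
    (fuel : Nat)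
    (hIH : ∀ (mines buffer : List Char) (turn num : Nat),
      buffer = (pvStream N num).drop turn →
      turn + buffer.length = pvT N num →
      mines.length ≤ tN →
      turn ≤ P + mines.length * M →
      P + mines.length * M < turn + M →
      fuel + turn = P + (tN - 1) * M + 1 →
      pvSolLoop (N : Int) (tN : Int) (M : Int) ((P : Int) + 1) fuel mines buffer (turn : Int) (num : Int)
        = mines ++ (List.range (tN - mines.length)).map (fun k => pvAt N (P + (mines.length + k) * M)))
    (mines : List Char) (now : Char) (rest : List Char) (turn num2 : Nat)
    (hdrop : (pvStream N num2).drop turn = now :: rest)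
    (hlen : turn + (now :: rest).length = pvT N num2)
    (hclt : mines.length < tN)
    (hw1 : turn ≤ P + mines.length * M)
    (hw2 : P + mines.length * M < turn + M)
    (hfuel : fuel + (turn + 1) = P + (tN - 1) * M + 1) :
    pvSolLoop (N : Int) (tN : Int) (M : Int) ((P : Int) + 1) fuel
      (if PySem.Int.mod (turn : Int) (M : Int) = (P : Int) + 1 - 1 then mines ++ [now] else mines)
      rest ((turn : Int) + 1) (num2 : Int)
      = mines ++ (List.range (tN - mines.length)).map (fun k => pvAt N (P + (mines.length + k) * M)) := by
  have hTnum : turn < pvT N num2 := by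
    simp only [List.length_cons] at hlen
    omega
  have hlenS : (pvStream N num2).length = pvT N num2 := rfl
  have hnow : now = pvAt N turn := by
    have h2 : (pvStream N num2).getD turn 'X' = now := by
      have h3 := congrArg (fun l => l.getD 0 'X') hdrop
      simp only [List.getD_cons_zero] at h3
      rw [← h3]
      rw [List.getD_eq_getElem _ _ (by omega), List.getD_eq_getElem _ _ (by simp; omega)]
      simp
    rw [← h2, pvAt_eq N num2 turn hTnum]
  have hrest : rest = (pvStream N num2).drop (turn + 1) := by
    have h3 := congrArg (List.drop 1) hdrop
    simp only [List.drop_drop] at h3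
    simpa using h3.symm
  have hlen2 : (turn + 1) + rest.length = pvT N num2 := by
    simp only [List.length_cons] at hlen
    omega
  have hmodc : PySem.Int.mod (turn : Int) (M : Int) = ((turn % M : Nat) : Int) := by
    exact_mod_cast PySem.Int.mod_natCast turn M
  have hPc : ((P : Int) + 1 - 1) = ((P : Nat) : Int) := by ring
  have hiff := pvWindow M P mines.length turn hM hP hw1 hw2
  have hcond : (PySem.Int.mod (turn : Int) (M : Int) = (P : Int) + 1 - 1) ↔ turn % M = P := by
    rw [hmodc, hPc]
    exact_mod_cast Iff.rfl
  by_cases hpick : turn % M = P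
  · have hteq : turn = P + mines.length * M := hiff.1 hpick
    rw [if_pos (hcond.2 hpick)]
    have hcast : ((turn : Int) + 1) = (((turn + 1 : Nat)) : Int) := by push_cast; ring
    rw [hcast]
    have e1 : P + (mines.length + 1) * M = P + mines.length * M + M := by ring
    have hIH2 := hIH (mines ++ [now]) rest (turn + 1) num2 hrest hlen2
      (by simp only [List.length_append, List.length_cons, List.length_nil]; omega)
      (by simp only [List.length_append, List.length_cons, List.length_nil]
          linarith)
      (by simp only [List.length_append, List.length_cons, List.length_nil]
          linarith)
      (by omega)
    rw [hIH2]
    simp only [List.length_append, List.length_cons, List.length_nil]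
    have hsub : tN - mines.length = (tN - (mines.length + 1)) + 1 := by omega
    rw [hsub, List.range_succ_eq_map, List.map_cons, List.map_map]
    have hf0 : pvAt N (P + (mines.length + 0) * M) = now := by
      rw [hnow, hteq]
      simp
    rw [hf0]
    have hmap : List.map ((fun k => pvAt N (P + (mines.length + k) * M)) ∘ Nat.succ)
          (List.range (tN - (mines.length + 1)))
        = List.map (fun k => pvAt N (P + (mines.length + 1 + k) * M))
          (List.range (tN - (mines.length + 1))) := by
      apply List.map_congr_left
      intro k _
      simp only [Function.comp_apply]
      rw [show mines.length + Nat.succ k = mines.length + 1 + k from by omega]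
    rw [hmap]
    simp
  · have hne : ¬ turn = P + mines.length * M := fun hc => hpick (hiff.2 hc)
    have hlt : turn < P + mines.length * M := lt_of_le_of_ne hw1 hne
    rw [if_neg (fun hc => hne (hiff.1 (hcond.1 hc)))]
    have hcast : ((turn : Int) + 1) = (((turn + 1 : Nat)) : Int) := by push_cast; ring
    rw [hcast]
    exact hIH mines rest (turn + 1) num2 hrest hlen2 (by omega) hlt (by linarith) (by omega)

-- the big invariant for A's outer loop
theorem pvSolLoop_inv (N M P tN : Nat) (hN : 2 ≤ N) (hM : 1 ≤ M) (hP : P < M) (htN : 1 ≤ tN) :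
    ∀ (fuel : Nat) (mines buffer : List Char) (turn num : Nat),
    buffer = (pvStream N num).drop turn →
    turn + buffer.length = pvT N num →
    mines.length ≤ tN →
    turn ≤ P + mines.length * M →
    P + mines.length * M < turn + M →
    fuel + turn = P + (tN - 1) * M + 1 →
    pvSolLoop (N : Int) (tN : Int) (M : Int) ((P : Int) + 1) fuel mines buffer (turn : Int) (num : Int)
      = mines ++ (List.range (tN - mines.length)).map (fun k => pvAt N (P + (mines.length + k) * M)) := by
  intro fuel
  induction fuel with
  | zero =>
    intro mines buffer turn num hbuf hlen hmines hw1 hw2 hfuel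
    have hc : mines.length = tN := by
      by_contra hc
      have hlt : mines.length ≤ tN - 1 := by omega
      have := Nat.mul_le_mul_right M hlt
      omega
    rw [pvSolLoop, hc, Nat.sub_self]
    simp
  | succ fuel ih =>
    intro mines buffer turn num hbuf hlen hmines hw1 hw2 hfuel
    by_cases hstop : mines.length = tN
    · rw [pvSolLoop, if_neg (by exact_mod_cast (by omega : ¬ (mines.length : Int) < (tN : Int)))]
      rw [hstop, Nat.sub_self]
      simp
    · have hclt : mines.length < tN := by omega
      rw [pvSolLoop, if_pos (by exact_mod_cast hclt)]
      cases hbufe : buffer with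
      | nil =>
        have hturn : turn = pvT N num := by
          rw [hbufe] at hlen
          simpa using hlen
        obtain ⟨c0, crest, hrep⟩ : ∃ c cs, pvRep N num = c :: cs := by
          cases hr : pvRep N num with
          | nil =>
            have := pvRep_length_pos N num
            rw [hr] at this
            simp at this
          | cons a l => exact ⟨a, l, rfl⟩
        have hconv : pvConvert (num : Int) (N : Int) = c0 :: crest := by
          rw [pvConvert_eq N hN num, hrep]
        simp only [hbufe, List.isEmpty_nil, if_true, List.nil_append, hconv]
        have hdrop2 : (pvStream N (num + 1)).drop turn = c0 :: crest := by
          rw [pvStream_succ, hturn, ← hlenS_def N num, List.drop_left, hrep]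
        have hlen3 : turn + (c0 :: crest).length = pvT N (num + 1) := by
          rw [pvT_succ, hturn, hrep]
        have hnum2 : ((num : Int) + 1) = (((num + 1 : Nat)) : Int) := by push_cast; ring
        rw [hnum2]
        exact pvStep N M P tN hN hM hP fuel ih mines c0 crest turn (num + 1)
          hdrop2 hlen3 hclt hw1 hw2 (by omega)
      | cons c0 crest =>
        have hbufe' : ¬ (c0 :: crest : List Char).isEmpty := by simp
        simp only [hbufe, List.isEmpty_cons, if_neg, Bool.false_eq_true, not_false_iff, if_false]
        rw [hbufe] at hbuf hlen
        exact pvStep N M P tN hN hM hP fuel ih mines c0 crest turn num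
          hbuf.symm hlen hclt hw1 hw2 (by omega)

-- ===== VERDICT (by name: the statement is the Claim_ definition above) =====
theorem solution_spec : Claim_equal_solution := by
  unfold Claim_equal_solution
  intro n t m p hdom hpre
  unfold Spec_solution solution solution_alt
  by_cases ht : t ≤ 0
  · rw [PySem.List.pyRange_one_eq_nil (by omega)]
    cases hf : (p + (t - 1) * m).toNat with
    | zero => simp [pvSolLoop]
    | succ f => simp [pvSolLoop, show ¬ (0 : Int) < t from by omega]
  · push_neg at ht
    obtain ⟨hn2, hm1, hp1, hpm, -⟩ := hpre.resolve_left (by omega)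
    set NN := n.toNat with hNN
    set MM := m.toNat with hMM
    set PP := (p - 1).toNat with hPP
    set TT := t.toNat with hTT
    have hN : 2 ≤ NN := by omega
    have hM : 1 ≤ MM := by omega
    have hP : PP < MM := by omega
    have htN : 1 ≤ TT := by omega
    have hn' : n = (NN : Int) := by omega
    have hm' : m = (MM : Int) := by omega
    have hp' : p = (PP : Int) + 1 := by omega
    have ht' : t = (TT : Int) := by omega
    have hfuel_eq : (p + (t - 1) * m).toNat = PP + (TT - 1) * MM + 1 := by
      have h1 : (((PP + (TT - 1) * MM + 1 : Nat)) : Int) = p + (t - 1) * m := by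
        push_cast [Nat.cast_sub htN]
        rw [hp', hm', ht']
        ring
      rw [← h1, Int.toNat_natCast]
    refine congrArg String.mk ?_
    rw [hfuel_eq, hn', ht', hm', hp']
    have hA := pvSolLoop_inv NN MM PP TT hN hM hP htN (PP + (TT - 1) * MM + 1) [] [] 0 0
      (by simp [pvStream]) (by simp [pvT, pvStream]) (by simp) (by simp)
      (by simpa using hP) (by simp)
    norm_num at hA
    rw [hA]
    rw [PySem.List.pyRange_one, List.map_map]
    have hTT0 : ((TT : Int) - 0).toNat = TT := by omega
    rw [hTT0]
    apply List.map_congr_left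
    intro k hk
    simp only [Function.comp_apply]
    have hi : (PP : Int) + 1 - 1 + (0 + (k : Int)) * (MM : Int) = ((PP + k * MM : Nat) : Int) := by
      push_cast
      ring
    rw [hi]
    exact (pvPickB_eq NN hN (PP + k * MM)).symm
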